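-- pv_equiv track=rewrite | github.com/molimi/learing-note | 2022/algorithm/base/ex02.py | anagram_solution
-- ===== SOURCE A (Python) =====
-- def anagram_solution(s1, s2):
--     copy_list = list(s2)
--     pos1 = 0
--     while pos1 < len(s1):
--         pos2 = 0
--         while pos2 < len(s2):
--             if s1[pos1] == copy_list[pos2]:
--                 copy_list[pos2] = None
--             else:
--                 pos2 += 1
--         pos1 += 1
--     if all(item is None for item in copy_list):
--         return True
--     else:
--         return False
-- ===== SOURCE B (Python) =====
-- def anagram_solution(s1, s2):
--     # A nullifies every occurrence of each s1 char, so counts never matter: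
--     # the result is simply "every character of s2 occurs in s1".
--     return all(c in s1 for c in s2)
-- ===== Notes on version B (the rewrite author's own statement) =====
-- stated objective: simpler
-- what changed: Replaced the double while-loop mark-and-scan over a mutable copy list by a one-line membership test: A nullifies all matching positions per s1 character, so its result is exactly 'every char of s2 occurs in s1'.
import Mathlib
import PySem

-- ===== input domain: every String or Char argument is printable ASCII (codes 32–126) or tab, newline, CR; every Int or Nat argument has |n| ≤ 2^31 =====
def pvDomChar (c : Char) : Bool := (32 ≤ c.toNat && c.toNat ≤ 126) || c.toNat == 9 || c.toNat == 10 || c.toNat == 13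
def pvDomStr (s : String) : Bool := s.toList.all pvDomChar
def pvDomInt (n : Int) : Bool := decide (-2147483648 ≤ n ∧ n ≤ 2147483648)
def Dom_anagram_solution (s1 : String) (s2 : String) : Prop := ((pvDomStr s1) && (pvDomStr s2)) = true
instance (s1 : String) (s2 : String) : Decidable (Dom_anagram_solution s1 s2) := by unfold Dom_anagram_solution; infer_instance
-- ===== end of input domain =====

-- B replaces A's double while-loop mark-and-scan with a one-line membership test
-- (A nullifies every matching position per s1 char, so counts never matter): simpler.


-- ===== PORT A =====
-- inner while loop of A: scan copy from index pos2; on a match set the cell to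
-- None (pos2 unchanged, exactly as in the Python), otherwise pos2 += 1.
def anagramInner (c : Char) (copy : List (Option Char)) (pos2 : Nat) : List (Option Char) :=
  if h : pos2 < copy.length then
    if copy[pos2] = some c then
      anagramInner c (copy.set pos2 none) pos2
    else
      anagramInner c copy (pos2 + 1)
  else copy
termination_by (copy.length - pos2) + copy.countP (fun o => o.isSome)
decreasing_by
  · have h1 : (copy.set pos2 none).length = copy.length := by simp
    have h2 := List.countP_set (p := fun o : Option Char => o.isSome) (a := none) h
    have h3 : 0 < copy.countP (fun o : Option Char => o.isSome) :=
      List.countP_pos_iff.mpr ⟨copy[pos2], List.getElem_mem h, by simp [*]⟩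
    have h4 : (copy.set pos2 none).countP (fun o : Option Char => o.isSome)
        = copy.countP (fun o : Option Char => o.isSome) - 1 := by
      rw [h2]; simp [*]
    rw [h1, h4]
    omega
  · omega

def anagram_solution (s1 : String) (s2 : String) : Bool :=
  -- copy_list = list(s2); the outer while over s1's positions is the fold over its chars
  let copy0 : List (Option Char) := s2.toList.map some
  let final := s1.toList.foldl (fun copy c => anagramInner c copy 0) copy0
  final.all (fun item => item.isNone)

-- ===== PORT B =====
def anagram_solution_alt (s1 : String) (s2 : String) : Bool :=
  s2.toList.all (fun c => s1.toList.contains c)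

-- ===== PRECONDITION & SPEC =====
def Spec_anagram_solution (s1 : String) (s2 : String) (out : Bool) : Prop := out = anagram_solution_alt s1 s2
instance (s1 : String) (s2 : String) (out : Bool) : Decidable (Spec_anagram_solution s1 s2 out) := by unfold Spec_anagram_solution; infer_instance

-- ===== CLAIM (what is proved, stated in full; the proofs are below) =====
def Claim_equal_anagram_solution : Prop := ∀ (s1 : String) (s2 : String), Dom_anagram_solution s1 s2 → Spec_anagram_solution s1 s2 (anagram_solution s1 s2)

-- ===== LEMMAS AND PROOFS =====

-- the inner loop erases (sets to none) every cell holding `some c`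
def eraseC (c : Char) (l : List (Option Char)) : List (Option Char) :=
  l.map (fun o => if o = some c then none else o)

theorem eraseC_cons (c : Char) (o : Option Char) (l : List (Option Char)) :
    eraseC c (o :: l) = (if o = some c then none else o) :: eraseC c l := rfl

theorem anagramInner_eq (c : Char) (copy : List (Option Char)) (pos2 : Nat) :
    anagramInner c copy pos2 = copy.take pos2 ++ eraseC c (copy.drop pos2) := by
  fun_induction anagramInner c copy pos2 with
  | case1 copy pos2 h hm ih =>
      rw [ih]
      have hd : copy.drop pos2 = copy[pos2] :: copy.drop (pos2 + 1) :=
        (List.getElem_cons_drop h).symm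
      have hts : (copy.set pos2 none).take pos2 = copy.take pos2 := by
        rw [List.take_set]
        exact List.set_eq_of_length_le (by rw [List.length_take]; omega)
      have hds : (copy.set pos2 none).drop pos2 = none :: copy.drop (pos2 + 1) := by
        rw [List.drop_set, if_neg (lt_irrefl pos2), Nat.sub_self, hd, List.set_cons_zero]
      rw [hts, hds, hd, eraseC_cons, eraseC_cons, if_neg (by simp), if_pos hm]
  | case2 copy pos2 h hm ih =>
      rw [ih]
      have hd : copy.drop pos2 = copy[pos2] :: copy.drop (pos2 + 1) :=
        (List.getElem_cons_drop h).symm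
      rw [List.take_succ_eq_append_getElem h, hd, eraseC_cons, if_neg hm,
        List.append_assoc, List.singleton_append]
  | case3 copy pos2 h =>
      have hle : copy.length ≤ pos2 := by omega
      simp [List.drop_eq_nil_of_le hle, List.take_of_length_le hle, eraseC]

theorem foldl_erase (l : List Char) (init : List (Option Char)) :
    l.foldl (fun copy c => anagramInner c copy 0) init
      = init.map (fun o => match o with
          | some ch => if ch ∈ l then none else some ch
          | none => none) := by
  induction l generalizing init with
  | nil =>
      simp only [List.foldl_nil]
      have hfn : (fun o : Option Char => match o with
          | some ch => if ch ∈ ([] : List Char) then none else some ch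
          | none => none) = id := funext fun o => by cases o <;> simp
      rw [hfn, List.map_id]
  | cons c t ih =>
      rw [List.foldl_cons, ih, anagramInner_eq]
      simp only [List.take_zero, List.drop_zero, List.nil_append, eraseC, List.map_map]
      apply List.map_congr_left
      intro o _
      cases o with
      | none => simp [Function.comp]
      | some ch =>
          by_cases hc : ch = c <;> simp [Function.comp, hc, List.mem_cons]

theorem anagram_solution_spec : Claim_equal_anagram_solution := by
  intro s1 s2 _
  unfold Spec_anagram_solution anagram_solution anagram_solution_alt
  simp only [foldl_erase, List.map_map]
  rw [Bool.eq_iff_iff, List.all_eq_true, List.all_eq_true]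
  constructor
  · intro hall c hc
    have h1 := hall _ (List.mem_map_of_mem hc)
    by_cases hm : c ∈ s1.toList
    · simpa using hm
    · simp [Function.comp, hm] at h1
  · intro hall o ho
    obtain ⟨c, hc, rfl⟩ := List.mem_map.mp ho
    have h1 := hall c hc
    simp only [List.contains_eq_mem, decide_eq_true_eq] at h1
    simp [Function.comp, h1]
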